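-- pv_equiv track=rewrite | github.com/kater-kcl/Sarina-bot | src/bot_module/mhw_module/mhw.py | generateSessionCode
-- ===== SOURCE A (Python) =====
-- dict = "234678abcdefhijkmnprstuvwxyzABCDEFGHJKLMNPQRTWXYZ!?@&+=$-"
--
-- def MUL128H(a, b):
--     return ((a * b) >> 64)
--
-- def generateSessionCode(lobby):
--     temp = lobby
--     sum = 0
--     while temp:
--         sum += temp & 0xFF
--         temp >>= 8
--     sum &= 0xFF
--     mulH = MUL128H(0x2492492492492493, sum)
--     sum -= ((((sum - mulH) >> 1) + mulH) >> 5) * 0x38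
--
--     temp = lobby
--     bytes = 0
--     count = 0
--     for i in range(8):
--         temp ^= (sum + 1) << bytes
--         bytes += 0x08
--
--     next = 1
--     count = 0
--     ans = ""
--     while next:
--         if count >= 12:
--             return ""
--         next = MUL128H(0x8FB823EE08FB823F, temp) >> 5
--         num = temp - next * 0x39
--         ans = dict[num] + ans
--         temp = next
--         count += 1
--     if count > 11:
--         return ""
--     ans = dict[sum + 1] + ans
--     return ans
-- ===== SOURCE B (Python) =====
-- dict = "234678abcdefhijkmnprstuvwxyzABCDEFGHJKLMNPQRTWXYZ!?@&+=$-"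
--
-- def _encode57(n):
--     q, r = divmod(n, 57)
--     return (_encode57(q) if q else "") + dict[r]
--
-- def generateSessionCode(lobby):
--     s = 0
--     temp = lobby
--     while temp:
--         s += temp & 0xFF
--         temp >>= 8
--     s = (s & 0xFF) % 56
--     temp = lobby ^ ((s + 1) * 0x0101010101010101)
--     return dict[s + 1] + _encode57(temp)
-- ===== Notes on version B (the rewrite author's own statement) =====
-- stated objective: simpler
-- what changed: Replaced the magic-multiply modulo reduction by a plain remainder operator, the eight-iteration shift/XOR loop by one XOR with a replicated-byte constant, and the magic-division base-57 while loop that prepends characters by a recursive divmod encoder; the byte-summing loop stays.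
import Mathlib
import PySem

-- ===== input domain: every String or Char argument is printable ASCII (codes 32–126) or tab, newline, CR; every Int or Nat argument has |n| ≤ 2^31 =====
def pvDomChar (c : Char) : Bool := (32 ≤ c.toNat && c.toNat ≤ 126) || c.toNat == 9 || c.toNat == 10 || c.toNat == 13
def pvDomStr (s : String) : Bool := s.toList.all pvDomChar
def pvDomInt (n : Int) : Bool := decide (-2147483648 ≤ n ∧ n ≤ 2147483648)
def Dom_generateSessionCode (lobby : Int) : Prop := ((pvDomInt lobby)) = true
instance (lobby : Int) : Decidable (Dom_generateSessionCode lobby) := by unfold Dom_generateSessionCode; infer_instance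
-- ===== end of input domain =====

-- B replaces A's magic-constant mod-56 reduction, 8-step shift/XOR loop and magic-division
-- base-57 while loop by a plain `% 56`, one closed-form XOR and a recursive divmod encoder (objective: simpler).

-- ===== PORT A =====

-- the code table both sources share
def pvDict : String := "234678abcdefhijkmnprstuvwxyzABCDEFGHJKLMNPQRTWXYZ!?@&+=$-"

-- Python `dict[i]` (a one-character string); the IndexError case (never reached under Pre_) is "" here
def pvCharAt (i : Int) : String := ((PySem.Str.pyGet? pvDict i).map String.singleton).getD ""

def MUL128H (a b : Int) : Int := (a * b) >>> (64:Nat)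

-- `while temp: sum += temp & 0xFF; temp >>= 8` — Python loops forever for temp < 0 (outside Pre_); we stop there
def pvByteSum (temp s : Int) : Int :=
  if 0 < temp then pvByteSum (temp >>> (8:Nat)) (s + PySem.Int.band temp 255)
  else s
termination_by temp.toNat
decreasing_by simp only [Int.shiftRight_eq_div_pow] at *; omega

-- the `for i in range(8)` XOR loop; `bytes` is a Nat shift count (in Python it is 0,8,…,56, never negative)
def pvXorLoop (temp s : Int) : Int × Nat :=
  (PySem.List.pyRange 0 8 1).foldl
    (fun (st : Int × Nat) _ => (PySem.Int.bxor st.1 ((s + 1) <<< st.2), st.2 + 8)) (temp, 0)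

-- the `while next:` loop; `none` = the early `return ""`; next < 0 (only for temp < 0, outside Pre_) stops here
def pvEncodeLoop (temp count : Int) (ans : String) : Option (Int × String) :=
  if 12 ≤ count then none
  else
    let next := (MUL128H 0x8FB823EE08FB823F temp) >>> (5:Nat)
    let num := temp - next * 0x39
    let ans' := pvCharAt num ++ ans
    if 0 < next then pvEncodeLoop next (count + 1) ans' else some (count + 1, ans')
termination_by (12 - count).toNat
decreasing_by omega

def generateSessionCode (lobby : Int) : String :=
  let sum0 := pvByteSum lobby 0
  let sum1 := PySem.Int.band sum0 255
  let mulH := MUL128H 0x2492492492492493 sum1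
  let sum := sum1 - ((((sum1 - mulH) >>> (1:Nat)) + mulH) >>> (5:Nat)) * 0x38
  let temp := (pvXorLoop lobby sum).1
  match pvEncodeLoop temp 0 "" with
  | none => ""
  | some (count, ans) => if 11 < count then "" else pvCharAt (sum + 1) ++ ans

-- ===== PORT B =====

-- same `while temp` byte-summing loop as Source B (Python loops forever for temp < 0, outside Pre_)
def altByteSum (temp s : Int) : Int :=
  if 0 < temp then altByteSum (temp >>> (8:Nat)) (s + PySem.Int.band temp 255)
  else s
termination_by temp.toNat
decreasing_by simp only [Int.shiftRight_eq_div_pow] at *; omega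

-- `_encode57`: recursive divmod base-57 encoder (Python diverges for n < 0, unreachable under Pre_)
def altEncode57 (n : Int) : String :=
  let q := PySem.Int.floordiv n 57
  let r := PySem.Int.mod n 57
  (if 0 < q then altEncode57 q else "") ++ pvCharAt r
termination_by n.toNat
decreasing_by
  have h57 : PySem.Int.floordiv n 57 = n / 57 := PySem.Int.floordiv_eq_ediv_of_pos (by norm_num)
  omega

def generateSessionCode_alt (lobby : Int) : String :=
  let s := PySem.Int.mod (PySem.Int.band (altByteSum lobby 0) 255) 56
  let temp := PySem.Int.bxor lobby ((s + 1) * 0x0101010101010101)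
  pvCharAt (s + 1) ++ altEncode57 temp

-- ===== PRECONDITION & SPEC =====
-- Pre_ excludes negative lobby ids, on which both Pythons' `while temp` loop never terminates (no return).
def Pre_generateSessionCode (lobby : Int) : Prop := 0 ≤ lobby
instance (lobby : Int) : Decidable (Pre_generateSessionCode lobby) := by unfold Pre_generateSessionCode; infer_instance
def pvWitness_generateSessionCode : Int := (12345)

def Spec_generateSessionCode (lobby : Int) (out : String) : Prop := out = generateSessionCode_alt lobby
instance (lobby : Int) (out : String) : Decidable (Spec_generateSessionCode lobby out) := by unfold Spec_generateSessionCode; infer_instance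

-- ===== CLAIM (what is proved, stated in full; the proofs are below) =====
def Claim_equal_generateSessionCode : Prop := ∀ (lobby : Int), Dom_generateSessionCode lobby → Pre_generateSessionCode lobby → Spec_generateSessionCode lobby (generateSessionCode lobby)

-- ===== LEMMAS AND PROOFS =====

theorem bs_eq (t s : Int) : altByteSum t s = pvByteSum t s := by
  fun_induction altByteSum t s with
  | case1 t s h ih => rw [pvByteSum, if_pos h, ih]
  | case2 t s h => rw [pvByteSum, if_neg h]

theorem bs_nonneg (t s : Int) (hs : 0 ≤ s) : 0 ≤ pvByteSum t s := by
  fun_induction pvByteSum t s with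
  | case1 t s h ih =>
      exact ih (by have := PySem.Int.band_nonneg_of_nonneg_left (a := t) 255 (le_of_lt h); omega)
  | case2 t s h => exact hs

-- A's magic-constant reduction is `% 56` on a byte
set_option maxRecDepth 4000 in
theorem magic_mod56 : ∀ m : Fin 256,
    (m : Int) - ((((m - MUL128H 0x2492492492492493 m) >>> (1:Nat)) + MUL128H 0x2492492492492493 m) >>> (5:Nat)) * 0x38
      = (m : Int) % 56 := by decide

-- A's magic division is division by 57 below 2^64
theorem magic_div57 (t : Int) (h0 : 0 ≤ t) (h1 : t < 2 ^ 64) :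
    (MUL128H 0x8FB823EE08FB823F t) >>> (5:Nat) = t / 57 := by
  simp only [MUL128H, Int.shiftRight_eq_div_pow]
  omega

theorem xor_const : ∀ m : Fin 56,
    (m.1 + 1) * 2 ^ 0 ^^^ ((m.1 + 1) * 2 ^ 8 ^^^ ((m.1 + 1) * 2 ^ 16 ^^^ ((m.1 + 1) * 2 ^ 24 ^^^
      ((m.1 + 1) * 2 ^ 32 ^^^ ((m.1 + 1) * 2 ^ 40 ^^^ ((m.1 + 1) * 2 ^ 48 ^^^ (m.1 + 1) * 2 ^ 56))))))
      = (m.1 + 1) * 0x0101010101010101 := by decide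

theorem xorLoop_eq (n m : Nat) (hm : m < 56) :
    (pvXorLoop (n : Int) (m : Int)).1 = PySem.Int.bxor (n : Int) (((m : Int) + 1) * 0x0101010101010101) := by
  have hr : PySem.List.pyRange 0 8 1 = [0, 1, 2, 3, 4, 5, 6, 7] := by decide
  have e : ∀ k : Nat, ((m : Int) + 1) * 2 ^ k = (((m + 1) * 2 ^ k : Nat) : Int) := by
    intro k; push_cast; ring
  have e2 : ((m : Int) + 1) * 0x0101010101010101 = (((m + 1) * 0x0101010101010101 : Nat) : Int) := by
    push_cast; ring
  simp only [pvXorLoop, hr, List.foldl, Int.shiftLeft_eq, e, e2, PySem.Int.bxor_natCast,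
    Nat.cast_inj]
  simp only [Nat.xor_assoc]
  have := xor_const ⟨m, hm⟩
  rw [this]

theorem encLoop_eq : ∀ (fuel : Nat), ∀ (t count : Int) (ans : String), t.toNat ≤ fuel → 0 < t → t < 2 ^ 64 →
    t < 57 ^ ((11 - count).toNat) →
    ∃ c : Int, c ≤ 11 ∧ pvEncodeLoop t count ans = some (c, altEncode57 t ++ ans) := by
  intro fuel
  induction fuel with
  | zero => intro t count ans hf h0 _ _; omega
  | succ f ih =>
    intro t count ans hf h0 h64 hpow
    have hk : (11 - count).toNat ≠ 0 := by
      intro hz; rw [hz, pow_zero] at hpow; omega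
    have hcnt : ¬ (12 ≤ count) := by omega
    have hd : (MUL128H 0x8FB823EE08FB823F t) >>> (5 : Nat) = t / 57 := magic_div57 t (le_of_lt h0) h64
    have hnum : t - t / 57 * 0x39 = t % 57 := by omega
    have hfd : PySem.Int.floordiv t 57 = t / 57 := PySem.Int.floordiv_eq_ediv_of_pos (by norm_num)
    have hmd : PySem.Int.mod t 57 = t % 57 := PySem.Int.mod_eq_emod_of_pos (by norm_num)
    rw [pvEncodeLoop, if_neg hcnt]
    simp only [hd, hnum]
    by_cases hq : 0 < t / 57
    · -- recursive case
      have hquot : t / 57 < 57 ^ ((11 - (count + 1)).toNat) := by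
        have h1 : t / 57 < 57 ^ ((11 - count).toNat - 1) := by
          rw [Int.ediv_lt_iff_lt_mul (by norm_num)]
          calc t < 57 ^ ((11 - count).toNat) := hpow
            _ = 57 ^ ((11 - count).toNat - 1) * 57 := by
                rw [← pow_succ]; congr 1; omega
        have h2 : (11 - (count + 1)).toNat = (11 - count).toNat - 1 := by omega
        rw [h2]; exact h1
      obtain ⟨c, hc, hrec⟩ := ih (t / 57) (count + 1) (pvCharAt (t % 57) ++ ans)
        (by omega) hq (by omega) hquot
      refine ⟨c, hc, ?_⟩
      rw [if_pos hq, hrec]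
      have henc : altEncode57 t = altEncode57 (t / 57) ++ pvCharAt (t % 57) := by
        rw [altEncode57]
        simp only [hfd, hmd, if_pos hq]
      rw [henc, String.append_assoc]
    · -- last digit
      refine ⟨count + 1, by omega, ?_⟩
      rw [if_neg hq]
      have henc : altEncode57 t = "" ++ pvCharAt (t % 57) := by
        rw [altEncode57]
        simp only [hfd, hmd, if_neg hq]
      rw [henc]
      simp

-- ===== VERDICT (by name: the statement is the Claim_ definition above) =====
theorem generateSessionCode_spec : Claim_equal_generateSessionCode := by
  intro lobby hdom hpre
  have hdom' : lobby ≤ 2147483648 := by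
    have := of_decide_eq_true hdom
    exact this.2
  obtain ⟨n, rfl⟩ : ∃ n : Nat, lobby = (n : Int) :=
    ⟨lobby.toNat, (Int.toNat_of_nonneg hpre).symm⟩
  have hn : n ≤ 2 ^ 31 := by exact_mod_cast hdom'
  -- the shared byte sum and its byte
  have hs0 : 0 ≤ pvByteSum (n : Int) 0 := bs_nonneg _ _ le_rfl
  have hb : PySem.Int.band (pvByteSum (n : Int) 0) 255
      = (((pvByteSum (n : Int) 0).toNat &&& 255 : Nat) : Int) :=
    PySem.Int.band_of_nonneg hs0 (by norm_num)
  set m255 : Nat := (pvByteSum (n : Int) 0).toNat &&& 255 with hm255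
  have hmlt : m255 < 256 := by have := Nat.and_le_right (n := (pvByteSum (↑n : Int) 0).toNat) (m := 255); omega
  -- A's magic reduction = m255 % 56
  have hmagic : ((m255 : Int)) - ((((↑m255 - MUL128H 0x2492492492492493 ↑m255) >>> (1 : Nat))
        + MUL128H 0x2492492492492493 ↑m255) >>> (5 : Nat)) * 0x38 = ((m255 % 56 : Nat) : Int) := by
    have := magic_mod56 ⟨m255, hmlt⟩
    rw [this]
    push_cast
    omega
  have hmodB : PySem.Int.mod ((m255 : Nat) : Int) 56 = ((m255 % 56 : Nat) : Int) :=
    PySem.Int.mod_natCast m255 56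
  set s : Nat := m255 % 56 with hs
  have hslt : s < 56 := Nat.mod_lt _ (by norm_num)
  -- the XORed payload
  have hxk : ((s : Int) + 1) * 0x0101010101010101
      = (((s + 1) * 0x0101010101010101 : Nat) : Int) := by push_cast; ring
  have hxor : PySem.Int.bxor (n : Int) (((s : Int) + 1) * 0x0101010101010101)
      = ((n ^^^ (s + 1) * 0x0101010101010101 : Nat) : Int) := by
    rw [hxk, PySem.Int.bxor_natCast]
  set N : Nat := n ^^^ (s + 1) * 0x0101010101010101 with hN
  have hN0 : N ≠ 0 := by
    rw [hN, Ne, Nat.xor_eq_zero_iff]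
    intro he
    have : 0x0101010101010101 ≤ (s + 1) * 0x0101010101010101 := Nat.le_mul_of_pos_left _ (by omega)
    omega
  have hN64 : N < 2 ^ 64 := by
    apply Nat.xor_lt_two_pow (by omega)
    calc (s + 1) * 0x0101010101010101 ≤ 56 * 0x0101010101010101 :=
          Nat.mul_le_mul_right _ (by omega)
      _ < 2 ^ 64 := by norm_num
  -- run the encoding loop
  obtain ⟨c, hc, hloop⟩ := encLoop_eq N.succ (N : Int) 0 "" (by omega)
    (by exact_mod_cast Nat.pos_of_ne_zero hN0) (by exact_mod_cast hN64)
    (by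
      show (N : Int) < 57 ^ (11 : Nat)
      calc (N : Int) < 2 ^ 64 := by exact_mod_cast hN64
        _ < 57 ^ (11 : Nat) := by norm_num)
  -- assemble
  show generateSessionCode ↑n = generateSessionCode_alt ↑n
  rw [generateSessionCode, generateSessionCode_alt, bs_eq]
  simp only [hb, hmagic, hmodB]
  rw [xorLoop_eq n s hslt]
  simp only [hxor, hloop]
  rw [if_neg (by omega)]
  simp
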